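-- pv_equiv track=rewrite | github.com/Mr-Kondo/agentic_debating_llms | app/licenses/collector.py | _extract_license
-- ===== SOURCE A (Python) =====
-- def _extract_license(metadata_text: str) -> str:
--     """Extract license identifier from METADATA text.
--
--     Priority order:
--       1. License-Expression header (SPDX, modern packaging standard)
--       2. License header (legacy field)
--       3. License :: ... classifiers (oldest fallback)
--     Returns "UNKNOWN" when no usable information is found.
--     """
--     license_expression: str | None = None
--     license_field: str | None = None
--     license_classifiers: list[str] = []
--
--     for line in metadata_text.splitlines():
--         if line.startswith("License-Expression:"):
--             license_expression = line.split(":", 1)[1].strip()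
--         elif line.startswith("License:") and not line.startswith("License-Expression:"):
--             value = line.split(":", 1)[1].strip()
--             if value and value.upper() != "UNKNOWN":
--                 license_field = value
--         elif line.startswith("Classifier: License ::"):
--             parts = line.split(" :: ")
--             if len(parts) >= 3:
--                 # Skip generic "OSI Approved" without a specific name
--                 label = parts[-1].strip()
--                 if label != "OSI Approved":
--                     license_classifiers.append(label)
--
--     if license_expression:
--         return license_expression
--     if license_field:
--         return license_field
--     if license_classifiers:
--         return " / ".join(license_classifiers)
--     return "UNKNOWN"
-- ===== SOURCE B (Python) =====
-- def _extract_license(metadata_text: str) -> str: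
--     """Three priority-ordered passes instead of one accumulating loop."""
--     lines = metadata_text.splitlines()
--
--     expression = None
--     for line in lines:
--         if line.startswith("License-Expression:"):
--             expression = line.split(":", 1)[1].strip()
--     if expression:
--         return expression
--
--     field = None
--     for line in lines:
--         if line.startswith("License:"):
--             value = line.split(":", 1)[1].strip()
--             if value and value.upper() != "UNKNOWN":
--                 field = value
--     if field:
--         return field
--
--     labels = []
--     for line in lines:
--         if line.startswith("Classifier: License ::"):
--             parts = line.split(" :: ")
--             if len(parts) >= 3:
--                 label = parts[-1].strip()
--                 if label != "OSI Approved":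
--                     labels.append(label)
--     if labels:
--         return " / ".join(labels)
--     return "UNKNOWN"
-- ===== Notes on version B (the rewrite author's own statement) =====
-- stated objective: alternative
-- what changed: Replaces the single loop that accumulates all three candidate fields at once with three separate priority-ordered passes, each later pass run only if the earlier priority produced nothing.
import Mathlib
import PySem

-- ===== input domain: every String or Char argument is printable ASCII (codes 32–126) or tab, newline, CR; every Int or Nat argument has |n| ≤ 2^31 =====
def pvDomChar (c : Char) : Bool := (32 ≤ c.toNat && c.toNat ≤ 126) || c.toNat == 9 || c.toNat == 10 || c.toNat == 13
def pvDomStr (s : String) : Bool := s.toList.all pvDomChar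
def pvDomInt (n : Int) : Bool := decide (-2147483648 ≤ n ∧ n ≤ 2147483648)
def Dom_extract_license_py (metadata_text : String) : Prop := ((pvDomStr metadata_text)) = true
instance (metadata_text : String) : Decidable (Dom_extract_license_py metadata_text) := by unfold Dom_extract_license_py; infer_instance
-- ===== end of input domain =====

-- B replaces A's single accumulating loop with three priority-ordered passes, a later pass run
-- only when every earlier priority produced nothing (objective: alternative decomposition).


-- ===== PORT A =====
-- line.split(":", 1)[1].strip() — the getD defaults are unreachable: every call site first
-- checks a startswith prefix containing ':', so split(":",1) returns exactly two pieces.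
def pvAfterColon (line : String) : String :=
  PySem.Str.strip (((PySem.Str.splitMax? line ":" 1).getD []).getD 1 "")

-- one step of A's single loop over the state (license_expression, license_field, license_classifiers)
def pvStepA (st : Option String × Option String × List String) (line : String) :
    Option String × Option String × List String :=
  let le := st.1; let lf := st.2.1; let lc := st.2.2
  if PySem.Str.startswith line "License-Expression:" then
    (some (pvAfterColon line), lf, lc)
  else if PySem.Str.startswith line "License:" && !(PySem.Str.startswith line "License-Expression:") then
    let value := pvAfterColon line
    if value ≠ "" ∧ PySem.Str.upper value ≠ "UNKNOWN" then (le, some value, lc) else (le, lf, lc)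
  else if PySem.Str.startswith line "Classifier: License ::" then
    -- split(" :: "): separator is a nonempty literal, so split? is some; pyGet? (-1) is the
    -- last piece of a split result, which is always a nonempty list — both getD unreachable.
    let parts := (PySem.Str.split? line " :: ").getD []
    if 3 ≤ parts.length then
      let label := PySem.Str.strip ((PySem.List.pyGet? parts (-1)).getD "")
      if label ≠ "OSI Approved" then (le, lf, lc ++ [label]) else (le, lf, lc)
    else (le, lf, lc)
  else (le, lf, lc)

def extract_license_py (metadata_text : String) : String :=
  let r := (PySem.Str.splitlines metadata_text).foldl pvStepA (none, none, [])
  -- Python truthiness of `Optional[str]`: None and "" are both falsy, i.e. getD "" ≠ ""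
  if r.1.getD "" ≠ "" then r.1.getD ""
  else if r.2.1.getD "" ≠ "" then r.2.1.getD ""
  else if r.2.2 ≠ [] then PySem.Str.join " / " r.2.2
  else "UNKNOWN"

-- ===== PORT B =====
-- pass 1: last License-Expression value
def pvStep1 (acc : Option String) (line : String) : Option String :=
  if PySem.Str.startswith line "License-Expression:" then some (pvAfterColon line) else acc

-- pass 2: last non-blank, non-UNKNOWN License value
def pvStep2 (acc : Option String) (line : String) : Option String :=
  if PySem.Str.startswith line "License:" then
    let value := pvAfterColon line
    if value ≠ "" ∧ PySem.Str.upper value ≠ "UNKNOWN" then some value else acc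
  else acc

-- pass 3: classifier labels in order
def pvStep3 (acc : List String) (line : String) : List String :=
  if PySem.Str.startswith line "Classifier: License ::" then
    let parts := (PySem.Str.split? line " :: ").getD []
    if 3 ≤ parts.length then
      let label := PySem.Str.strip ((PySem.List.pyGet? parts (-1)).getD "")
      if label ≠ "OSI Approved" then acc ++ [label] else acc
    else acc
  else acc

def extract_license_py_alt (metadata_text : String) : String :=
  let lines := PySem.Str.splitlines metadata_text
  let e := lines.foldl pvStep1 none
  if e.getD "" ≠ "" then e.getD ""
  else
    let f := lines.foldl pvStep2 none
    if f.getD "" ≠ "" then f.getD ""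
    else
      let c := lines.foldl pvStep3 []
      if c ≠ [] then PySem.Str.join " / " c else "UNKNOWN"

-- ===== PRECONDITION & SPEC =====
def Spec_extract_license_py (metadata_text : String) (out : String) : Prop := out = extract_license_py_alt metadata_text
instance (metadata_text : String) (out : String) : Decidable (Spec_extract_license_py metadata_text out) := by unfold Spec_extract_license_py; infer_instance

-- ===== CLAIM (what is proved, stated in full; the proofs are below) =====
def Claim_equal_extract_license_py : Prop := ∀ (metadata_text : String), Dom_extract_license_py metadata_text → Spec_extract_license_py metadata_text (extract_license_py metadata_text)

-- ===== LEMMAS AND PROOFS =====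

-- two fixed headers can only both be prefixes of a line if the shorter is a prefix of the longer
lemma pv_prefix_excl (p q s : String)
    (hlen : q.toList.length ≤ p.toList.length)
    (hnp : ¬ (q.toList <+: p.toList))
    (h : PySem.Str.startswith s p = true) :
    PySem.Str.startswith s q = false := by
  rw [PySem.Str.startswith_eq, PySem.Chars.startswith_iff] at h
  rw [PySem.Str.startswith_eq, Bool.eq_false_iff]
  intro hq
  rw [PySem.Chars.startswith_iff] at hq
  exact hnp (List.prefix_of_prefix_length_le hq h hlen)

lemma pv_LE_not_L (s : String) (h : PySem.Str.startswith s "License-Expression:" = true) :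
    PySem.Str.startswith s "License:" = false :=
  pv_prefix_excl _ _ _ (by decide) (by decide) h

lemma pv_C_not_LE (s : String) (h : PySem.Str.startswith s "Classifier: License ::" = true) :
    PySem.Str.startswith s "License-Expression:" = false :=
  pv_prefix_excl _ _ _ (by decide) (by decide) h

lemma pv_C_not_L (s : String) (h : PySem.Str.startswith s "Classifier: License ::" = true) :
    PySem.Str.startswith s "License:" = false :=
  pv_prefix_excl _ _ _ (by decide) (by decide) h

-- one step of A's loop updates the three components independently, exactly as B's three passes do
lemma pv_step_split (a b : Option String) (c : List String) (l : String) :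
    pvStepA (a, b, c) l = (pvStep1 a l, pvStep2 b l, pvStep3 c l) := by
  unfold pvStepA pvStep1 pvStep2 pvStep3
  by_cases h1 : PySem.Str.startswith l "License-Expression:" = true
  · have h2 := pv_LE_not_L l h1
    have h3 : PySem.Str.startswith l "Classifier: License ::" = false := by
      rw [Bool.eq_false_iff]; intro hC
      rw [pv_C_not_LE l hC] at h1; exact Bool.false_ne_true h1
    simp at h1 h2 h3
    simp [h1, h2, h3]
  · rw [Bool.not_eq_true] at h1
    by_cases hL : PySem.Str.startswith l "License:" = true
    · have h3 : PySem.Str.startswith l "Classifier: License ::" = false := by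
        rw [Bool.eq_false_iff]; intro hC
        rw [pv_C_not_L l hC] at hL; exact Bool.false_ne_true hL
      simp at h1 hL h3
      simp [h1, hL, h3]
      split_ifs <;> rfl
    · rw [Bool.not_eq_true] at hL
      simp at h1 hL
      simp [h1, hL]
      split_ifs <;> rfl

lemma pv_fold_split : ∀ (ls : List String) (a b : Option String) (c : List String),
    ls.foldl pvStepA (a, b, c) = (ls.foldl pvStep1 a, ls.foldl pvStep2 b, ls.foldl pvStep3 c) := by
  intro ls
  induction ls with
  | nil => intro a b c; rfl
  | cons l t ih => intro a b c; rw [List.foldl_cons, List.foldl_cons, List.foldl_cons,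
      List.foldl_cons, pv_step_split]; exact ih _ _ _

-- ===== VERDICT (by name: the statement is the Claim_ definition above) =====
theorem extract_license_py_spec : Claim_equal_extract_license_py := by
  intro s _
  unfold Spec_extract_license_py extract_license_py extract_license_py_alt
  rw [pv_fold_split]
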